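-- pv_equiv track=rewrite | github.com/schivam18/doctorci | src/therapy_classifier.py | classify_therapy
-- ===== SOURCE A (Python) =====
-- from typing import Dict, List
--
-- THERAPY_CATEGORIES: Dict[str, Dict[str, List[str]]] = {
--     "Immune Checkpoint Inhibitors": {
--         "approved": ["Pembrolizumab", "Nivolumab", "Ipilimumab", "Relatlimab"],
--         "unapproved": ["Triple checkpoint blockade", "new antibodies"]
--     },
--     "Cellular Therapy": {
--         "approved": ["Lifileucel", "Amtagvi", "TIL therapy"],
--         "unapproved": ["CAR T-cell therapy"]
--     },
--     "Targeted Therapy": {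
--         "approved": ["Vemurafenib", "Dabrafenib", "Trametinib", "Encorafenib"],
--         "unapproved": ["Next-gen BRAF/MEK inhibitors", "new combos"]
--     },
--     "Oncolytic Virus Therapy": {
--         "approved": ["Talimogene laherparepvec", "Imlygic"],
--         "unapproved": ["Other viral vectors"]
--     },
--     "Chemotherapy": {
--         "approved": ["Dacarbazine"],
--         "unapproved": ["Temozolomide", "Fotemustine"]
--     },
--     "Bispecific Antibodies": {
--         "approved": ["Tebentafusp-tebn", "Kimmtrak"],
--         "unapproved": ["Other bispecifics in trial"]
--     },
--     "Vaccine/Immunostimulant": {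
--         "approved": [],
--         "unapproved": ["Cancer vaccines", "immunostimulants"]
--     }
-- }
--
-- def classify_therapy(generic_name: str) -> str:
--     """
--     Classifies the therapy type based on the generic drug name.
--
--     Args:
--         generic_name: The generic name of the drug or combination.
--
--     Returns:
--         The classified therapy type, or "Unknown" if not found.
--     """
--     if not generic_name or not isinstance(generic_name, str):
--         return "Unknown"
--
--     # Split combinations and check each drug
--     drug_names = [name.strip().lower() for name in generic_name.split('+')]
--
--     for drug in drug_names:
--         for category, sub_categories in THERAPY_CATEGORIES.items():
--             for status, drug_list in sub_categories.items():
--                 if any(known_drug.lower() in drug for known_drug in drug_list):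
--                     return category
--
--     return "Unknown"
-- ===== SOURCE B (Python) =====
-- from typing import Dict, List
--
-- THERAPY_CATEGORIES: Dict[str, Dict[str, List[str]]] = {
--     "Immune Checkpoint Inhibitors": {
--         "approved": ["Pembrolizumab", "Nivolumab", "Ipilimumab", "Relatlimab"],
--         "unapproved": ["Triple checkpoint blockade", "new antibodies"]
--     },
--     "Cellular Therapy": {
--         "approved": ["Lifileucel", "Amtagvi", "TIL therapy"],
--         "unapproved": ["CAR T-cell therapy"]
--     },
--     "Targeted Therapy": {
--         "approved": ["Vemurafenib", "Dabrafenib", "Trametinib", "Encorafenib"],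
--         "unapproved": ["Next-gen BRAF/MEK inhibitors", "new combos"]
--     },
--     "Oncolytic Virus Therapy": {
--         "approved": ["Talimogene laherparepvec", "Imlygic"],
--         "unapproved": ["Other viral vectors"]
--     },
--     "Chemotherapy": {
--         "approved": ["Dacarbazine"],
--         "unapproved": ["Temozolomide", "Fotemustine"]
--     },
--     "Bispecific Antibodies": {
--         "approved": ["Tebentafusp-tebn", "Kimmtrak"],
--         "unapproved": ["Other bispecifics in trial"]
--     },
--     "Vaccine/Immunostimulant": {
--         "approved": [],
--         "unapproved": ["Cancer vaccines", "immunostimulants"]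
--     }
-- }
--
-- # Flat (lowered keyword, category) table, built once, in A's visiting order.
-- FLAT = [(known.lower(), category)
--         for category, subs in THERAPY_CATEGORIES.items()
--         for drug_list in subs.values()
--         for known in drug_list]
--
--
-- def classify_therapy(generic_name: str) -> str:
--     if not generic_name or not isinstance(generic_name, str):
--         return "Unknown"
--     drugs = [t.strip().lower() for t in generic_name.split('+')]
--     # Single left-to-right pass over the keyword table (table-outer, not
--     # drug-outer): track the smallest drug index any keyword has hit so far;
--     # an earlier keyword wins ties, so the strict '<' keeps A's priorities.
--     best_i, best_cat = len(drugs), "Unknown"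
--     for sub, cat in FLAT:
--         i = next((i for i, d in enumerate(drugs) if sub in d), None)
--         if i is not None and i < best_i:
--             best_i, best_cat = i, cat
--     return best_cat
-- ===== Notes on version B (the rewrite author's own statement) =====
-- stated objective: alternative
-- what changed: Interchanges the loops: instead of A's drug-outer early-return walk over the triple-nested dicts, B makes one left-to-right pass over a flat keyword table, tracking the minimal drug-token index hit so far (strict '<' so an earlier table entry wins ties), which provably reproduces A's drug-then-table priority.
import Mathlib
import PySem

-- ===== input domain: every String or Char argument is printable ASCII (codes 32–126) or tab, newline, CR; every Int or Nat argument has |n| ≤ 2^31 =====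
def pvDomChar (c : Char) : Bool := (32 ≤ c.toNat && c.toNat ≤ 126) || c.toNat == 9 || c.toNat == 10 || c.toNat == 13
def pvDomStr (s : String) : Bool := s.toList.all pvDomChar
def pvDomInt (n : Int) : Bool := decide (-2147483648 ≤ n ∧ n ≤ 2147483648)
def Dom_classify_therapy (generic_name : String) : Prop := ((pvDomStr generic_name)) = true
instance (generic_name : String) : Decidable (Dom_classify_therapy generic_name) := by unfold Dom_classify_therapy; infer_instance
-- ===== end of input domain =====

-- B interchanges the loops: one pass over a flat keyword table tracking the minimal
-- matching drug-token index, instead of A's drug-outer early-return nested-dict walk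
-- (objective: alternative).

-- ===== PORT A =====
def THERAPY_CATEGORIES : List (String × List (String × List String)) := [
  ("Immune Checkpoint Inhibitors",
    [("approved", ["Pembrolizumab", "Nivolumab", "Ipilimumab", "Relatlimab"]),
     ("unapproved", ["Triple checkpoint blockade", "new antibodies"])]),
  ("Cellular Therapy",
    [("approved", ["Lifileucel", "Amtagvi", "TIL therapy"]),
     ("unapproved", ["CAR T-cell therapy"])]),
  ("Targeted Therapy",
    [("approved", ["Vemurafenib", "Dabrafenib", "Trametinib", "Encorafenib"]),
     ("unapproved", ["Next-gen BRAF/MEK inhibitors", "new combos"])]),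
  ("Oncolytic Virus Therapy",
    [("approved", ["Talimogene laherparepvec", "Imlygic"]),
     ("unapproved", ["Other viral vectors"])]),
  ("Chemotherapy",
    [("approved", ["Dacarbazine"]),
     ("unapproved", ["Temozolomide", "Fotemustine"])]),
  ("Bispecific Antibodies",
    [("approved", ["Tebentafusp-tebn", "Kimmtrak"]),
     ("unapproved", ["Other bispecifics in trial"])]),
  ("Vaccine/Immunostimulant",
    [("approved", []),
     ("unapproved", ["Cancer vaccines", "immunostimulants"])])]

-- inner loop of A: 'for status, drug_list in sub_categories.items(): if any(...): return category'
def statusScan (drug : String) (category : String) : List (String × List String) → Option String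
  | [] => none
  | (_, drug_list) :: rest =>
      if drug_list.any (fun kd => PySem.Str.isIn (PySem.Str.lower kd) drug)
      then some category else statusScan drug category rest

-- middle loop of A: 'for category, sub_categories in THERAPY_CATEGORIES.items(): …'
def catScan (drug : String) : List (String × List (String × List String)) → Option String
  | [] => none
  | (category, subs) :: rest => (statusScan drug category subs).or (catScan drug rest)

-- outer loop of A: 'for drug in drug_names: …'
def drugScanA : List String → Option String
  | [] => none
  | drug :: rest =>
      match catScan drug THERAPY_CATEGORIES with
      | some c => some c
      | none => drugScanA rest

def classify_therapy (generic_name : String) : String :=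
  if generic_name == "" then "Unknown"
  else
    let drug_names := ((PySem.Str.split? generic_name "+").getD []).map (fun n => PySem.Str.lower (PySem.Str.strip n))
    (drugScanA drug_names).getD "Unknown"

-- ===== PORT B =====
-- FLAT = [(known.lower(), category) for category, subs in … for drug_list in subs.values() for known in drug_list]
def FLAT : List (String × String) :=
  THERAPY_CATEGORIES.flatMap (fun catp =>
    catp.2.flatMap (fun sp => sp.2.map (fun known => (PySem.Str.lower known, catp.1))))

-- i = next((i for i, d in enumerate(drugs) if sub in d), None)
def firstIdx (sub : String) : List String → Option Nat
  | [] => none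
  | d :: rest => if PySem.Str.isIn sub d then some 0 else (firstIdx sub rest).map (· + 1)

-- loop body: 'if i is not None and i < best_i: best_i, best_cat = i, cat'
def stepB (drugs : List String) (st : Nat × String) (e : String × String) : Nat × String :=
  match firstIdx e.1 drugs with
  | some i => if i < st.1 then (i, e.2) else st
  | none => st

def classify_therapy_alt (generic_name : String) : String :=
  if generic_name == "" then "Unknown"
  else
    let drugs := ((PySem.Str.split? generic_name "+").getD []).map (fun n => PySem.Str.lower (PySem.Str.strip n))
    (FLAT.foldl (stepB drugs) (drugs.length, "Unknown")).2

-- ===== PRECONDITION & SPEC =====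
def Spec_classify_therapy (generic_name : String) (out : String) : Prop := out = classify_therapy_alt generic_name
instance (generic_name : String) (out : String) : Decidable (Spec_classify_therapy generic_name out) := by unfold Spec_classify_therapy; infer_instance

-- ===== CLAIM (what is proved, stated in full; the proofs are below) =====
def Claim_equal_classify_therapy : Prop := ∀ (generic_name : String), Dom_classify_therapy generic_name → Spec_classify_therapy generic_name (classify_therapy generic_name)

-- ===== LEMMAS AND PROOFS =====

-- proof-layer reference: drug-outer scan of the flat table (first drug, first entry)
def flatScan (drug : String) : List (String × String) → Option String
  | [] => none
  | (sub, cat) :: rest => if PySem.Str.isIn sub drug then some cat else flatScan drug rest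

def scanAO : List String → Option String
  | [] => none
  | drug :: rest =>
      match flatScan drug FLAT with
      | some c => some c
      | none => scanAO rest

-- A's nested walk equals the flat drug-outer scan (finite table: compute both)
theorem ite_or_some {α : Type} (a b : Bool) (x : α) (e : α) :
    (if a || b then x else e) = if a then x else if b then x else e := by
  cases a <;> simp

theorem ite_some_or {α : Type} (c : Bool) (x : α) (e f : Option α) :
    (Option.or (if c then some x else e) f) = if c then some x else Option.or e f := by
  cases c <;> simp

theorem inner_eq (drug : String) :
    catScan drug THERAPY_CATEGORIES = flatScan drug FLAT := by
  simp only [THERAPY_CATEGORIES, FLAT, List.flatMap_cons, List.flatMap_nil,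
    List.map_cons, List.map_nil, List.cons_append, List.nil_append, List.append_nil,
    catScan, statusScan, flatScan, List.any_cons, List.any_nil, Bool.or_false,
    ite_or_some, ite_some_or, Option.none_or, Bool.false_eq_true, if_false]

theorem drugScan_eq (l : List String) : drugScanA l = scanAO l := by
  induction l with
  | nil => rfl
  | cons d rest ih => simp only [drugScanA, scanAO, inner_eq, ih]

-- best entry of a table F against drugs: (minimal matching drug index, its category),
-- earlier table entry winning ties
def bestF (drugs : List String) : List (String × String) → Option (Nat × String)
  | [] => none
  | e :: rest =>
      match firstIdx e.1 drugs, bestF drugs rest with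
      | none, r => r
      | some i, none => some (i, e.2)
      | some i, some (j, c) => if i ≤ j then some (i, e.2) else some (j, c)

theorem fold_eq (drugs : List String) (F : List (String × String)) :
    ∀ st : Nat × String,
      F.foldl (stepB drugs) st =
        match bestF drugs F with
        | none => st
        | some (i, c) => if i < st.1 then (i, c) else st := by
  induction F with
  | nil => intro st; rfl
  | cons e F ih =>
      intro st
      simp only [List.foldl_cons, ih, bestF, stepB]
      cases h1 : firstIdx e.1 drugs with
      | none => cases bestF drugs F with
          | none => rfl
          | some p => rfl
      | some i =>
          cases h2 : bestF drugs F with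
          | none =>
              by_cases hi : i < st.1 <;> simp [hi]
          | some p =>
              obtain ⟨j, c⟩ := p
              by_cases hi : i < st.1 <;> by_cases hij : i ≤ j <;>
                by_cases hj : j < st.1 <;>
                simp [hi, hij, hj] <;> omega
  
theorem firstIdx_lt (sub : String) (drugs : List String) (i : Nat)
    (h : firstIdx sub drugs = some i) : i < drugs.length := by
  induction drugs generalizing i with
  | nil => simp [firstIdx] at h
  | cons d rest ih =>
      simp only [firstIdx] at h
      split_ifs at h with hd
      · cases h; simp
      · cases hr : firstIdx sub rest with
        | none => simp [hr] at h
        | some k =>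
            simp [hr] at h
            have := ih k hr
            simp [← h]
            omega

theorem bestF_lt (drugs : List String) (F : List (String × String)) (i : Nat) (c : String)
    (h : bestF drugs F = some (i, c)) : i < drugs.length := by
  induction F generalizing i c with
  | nil => simp [bestF] at h
  | cons e F ih =>
      simp only [bestF] at h
      cases h1 : firstIdx e.1 drugs with
      | none => rw [h1] at h; exact ih i c h
      | some k =>
          have hk := firstIdx_lt e.1 drugs k h1
          rw [h1] at h
          cases h2 : bestF drugs F with
          | none => rw [h2] at h; cases h; exact hk
          | some p =>
              obtain ⟨j, c'⟩ := p
              have hj := ih j c' h2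
              rw [h2] at h
              dsimp only at h
              split_ifs at h <;> cases h <;> omega

-- shift lemma: bestF on (d :: rest) factors through the first drug
theorem bestF_cons (d : String) (rest : List String) (F : List (String × String)) :
    bestF (d :: rest) F =
      match flatScan d F with
      | some c => some (0, c)
      | none => (bestF rest F).map (fun p => (p.1 + 1, p.2)) := by
  induction F with
  | nil => rfl
  | cons e F ih =>
      simp only [bestF, flatScan, firstIdx]
      by_cases hd : PySem.Str.isIn e.1 d
      · simp only [hd, if_true]
        cases h2 : bestF (d :: rest) F with
        | none => rfl
        | some p =>
            obtain ⟨j, c⟩ := p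
            simp
      · simp only [hd, if_false, Bool.false_eq_true, ih]
        cases hf : flatScan d F with
        | some c =>
            cases hr : firstIdx e.1 rest with
            | none => simp
            | some k => simp [Nat.not_le.mpr (Nat.succ_pos k)]
        | none =>
            cases hr : firstIdx e.1 rest with
            | none => simp
            | some k =>
                cases hb : bestF rest F with
                | none => simp
                | some p =>
                    obtain ⟨j, c⟩ := p
                    by_cases hkj : k ≤ j <;> simp [hkj]

theorem bestF_nil (F : List (String × String)) : bestF [] F = none := by
  induction F with
  | nil => rfl
  | cons e F ih => simp [bestF, firstIdx, ih]

theorem bestF_scanAO (drugs : List String) :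
    (match bestF drugs FLAT with
     | none => "Unknown"
     | some p => p.2) = (scanAO drugs).getD "Unknown" := by
  induction drugs with
  | nil => simp [bestF_nil, scanAO]
  | cons d rest ih =>
      rw [bestF_cons]
      cases hf : flatScan d FLAT with
      | some c => simp [scanAO, hf]
      | none =>
          simp only [scanAO, hf]
          cases hb : bestF rest FLAT with
          | none => simpa [hb] using ih
          | some p => simpa [hb] using ih

theorem core_eq (drugs : List String) :
    (drugScanA drugs).getD "Unknown" =
      (FLAT.foldl (stepB drugs) (drugs.length, "Unknown")).2 := by
  rw [fold_eq, drugScan_eq, ← bestF_scanAO]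
  cases hb : bestF drugs FLAT with
  | none => rfl
  | some p =>
      obtain ⟨i, c⟩ := p
      simp [bestF_lt drugs FLAT i c hb]

-- ===== VERDICT (by name: the statement is the Claim_ definition above) =====
theorem classify_therapy_spec : Claim_equal_classify_therapy := by
  intro g _
  unfold Spec_classify_therapy classify_therapy classify_therapy_alt
  by_cases h : g = "" <;> simp [h, core_eq]
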